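-- pv_equiv track=rewrite | github.com/sieukim/algorithm-programmers | level0/ex18.py | solution
-- ===== SOURCE A (Python) =====
-- def solution(id_pw, db):
--     # [id, pw] -> [id 일치 여부, pw 일치 여부]
--     db_match = [[id==id_pw[0], pw==id_pw[1]] for id, pw in db]
--
--     # 아이디와 비밀번호가 모두 일치하는 회원정보가 있는 경우
--     if [True, True] in db_match:
--         return 'login'
--     # 로그인이 실패했을 때 아이디가 일치하는 회원이 없는 경우
--     elif [True, False] not in db_match:
--         return 'fail'
--     # 아이디는 일치하지만 비밀번호가 일치하는 회원이 없는 경우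
--     else:
--         return 'wrong pw'
-- ===== SOURCE B (Python) =====
-- def solution(id_pw, db):
--     # Score each row: 2 = full match, 1 = id matches only, 0 = no match;
--     # the answer is a table lookup on the best score over the database.
--     best = max((2 if i == id_pw[0] and p == id_pw[1]
--                 else 1 if i == id_pw[0]
--                 else 0
--                 for i, p in db), default=0)
--     return ['fail', 'wrong pw', 'login'][best]
-- ===== Notes on version B (the rewrite author's own statement) =====
-- stated objective: alternative
-- what changed: Replaces A's boolean-pair list plus two membership tests by an arithmetical formulation: each row is scored 0/1/2 (no match / id only / full match), the maximum score is taken over the database, and the answer is a table lookup on that score.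
import Mathlib
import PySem

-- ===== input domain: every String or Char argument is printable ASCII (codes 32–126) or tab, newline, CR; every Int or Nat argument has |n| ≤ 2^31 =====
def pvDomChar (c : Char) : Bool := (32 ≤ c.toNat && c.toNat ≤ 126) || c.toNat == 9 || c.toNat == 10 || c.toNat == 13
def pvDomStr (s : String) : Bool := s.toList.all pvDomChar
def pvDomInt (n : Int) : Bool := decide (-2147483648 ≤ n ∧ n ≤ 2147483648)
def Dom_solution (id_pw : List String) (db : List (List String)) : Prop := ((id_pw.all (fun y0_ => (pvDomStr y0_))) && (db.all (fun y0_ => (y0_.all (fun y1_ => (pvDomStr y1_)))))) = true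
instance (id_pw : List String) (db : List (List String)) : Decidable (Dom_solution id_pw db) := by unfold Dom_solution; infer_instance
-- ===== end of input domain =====

-- B replaces A's boolean-pair list + two membership scans by a 0/1/2 row score, a max over db, and a table lookup (alternative formulation).


-- ===== PORT A =====
-- rows are unpacked as [id, pw] and compared against id_pw[0]/id_pw[1]; ported via pyGet? (exact under Pre_)
def solution (id_pw : List String) (db : List (List String)) : String :=
  let db_match := db.map (fun row =>
    (PySem.List.pyGet? row 0 == PySem.List.pyGet? id_pw 0,
     PySem.List.pyGet? row 1 == PySem.List.pyGet? id_pw 1))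
  if db_match.contains (true, true) then "login"
  else if ¬ (db_match.contains (true, false) = true) then "fail"
  else "wrong pw"

-- ===== PORT B =====
-- score of one row: 2 = full match, 1 = id matches only, 0 = otherwise
def scoreRow (id_pw : List String) (row : List String) : Nat :=
  if (PySem.List.pyGet? row 0 == PySem.List.pyGet? id_pw 0) &&
     (PySem.List.pyGet? row 1 == PySem.List.pyGet? id_pw 1) then 2
  else if PySem.List.pyGet? row 0 == PySem.List.pyGet? id_pw 0 then 1
  else 0

def solution_alt (id_pw : List String) (db : List (List String)) : String :=
  let best := (db.map (scoreRow id_pw)).foldl max 0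
  -- table lookup ['fail','wrong pw','login'][best]; best ≤ 2 by construction, so getD's default is never used
  (["fail", "wrong pw", "login"].getD best "")

-- ===== PRECONDITION & SPEC =====
-- Pre_ excludes exactly the inputs where Python A raises: with a nonempty db, id_pw must have the two
-- indexed entries and every row must unpack as exactly two values (B raises on those inputs too).
def Pre_solution (id_pw : List String) (db : List (List String)) : Prop :=
  (db = [] ∨ 2 ≤ id_pw.length) ∧ ∀ row ∈ db, row.length = 2
instance (id_pw : List String) (db : List (List String)) : Decidable (Pre_solution id_pw db) := by
  unfold Pre_solution; infer_instance
def pvWitness_solution : List String × List (List String) := (["a", "b"], [["a", "c"], ["x", "y"]])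
def Spec_solution (id_pw : List String) (db : List (List String)) (out : String) : Prop := out = solution_alt id_pw db
instance (id_pw : List String) (db : List (List String)) (out : String) : Decidable (Spec_solution id_pw db out) := by unfold Spec_solution; infer_instance

-- ===== CLAIM (what is proved, stated in full; the proofs are below) =====
def Claim_equal_solution : Prop := ∀ (id_pw : List String) (db : List (List String)), Dom_solution id_pw db → Pre_solution id_pw db → Spec_solution id_pw db (solution id_pw db)

-- ===== LEMMAS AND PROOFS =====
theorem le_foldl_max (l : List Nat) (acc n : Nat) :
    n ≤ l.foldl max acc ↔ n ≤ acc ∨ ∃ x ∈ l, n ≤ x := by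
  induction l generalizing acc with
  | nil => simp
  | cons h t ih =>
      simp only [List.foldl_cons, ih, List.mem_cons]
      constructor
      · rintro (hm | hx)
        · rcases le_max_iff.mp hm with h1 | h2
          · exact Or.inl h1
          · exact Or.inr ⟨h, Or.inl rfl, h2⟩
        · obtain ⟨x, hx1, hx2⟩ := hx
          exact Or.inr ⟨x, Or.inr hx1, hx2⟩
      · rintro (h1 | ⟨x, (rfl | hx1), hx2⟩)
        · exact Or.inl (le_max_of_le_left h1)
        · exact Or.inl (le_max_of_le_right hx2)
        · exact Or.inr ⟨x, hx1, hx2⟩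

theorem foldl_max_le (l : List Nat) : ∀ acc k : Nat, acc ≤ k → (∀ x ∈ l, x ≤ k) →
    l.foldl max acc ≤ k := by
  induction l with
  | nil => intro acc k h _; simpa using h
  | cons a t ih =>
      intro acc k h hl
      simp only [List.foldl_cons]
      exact ih _ _ (max_le h (hl a List.mem_cons_self)) (fun x hx => hl x (List.mem_cons_of_mem a hx))

theorem scoreRow_le_two (id_pw row : List String) : scoreRow id_pw row ≤ 2 := by
  unfold scoreRow; split_ifs <;> omega

theorem two_le_score (id_pw row : List String) :
    2 ≤ scoreRow id_pw row ↔
      ((PySem.List.pyGet? row 0 == PySem.List.pyGet? id_pw 0) &&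
       (PySem.List.pyGet? row 1 == PySem.List.pyGet? id_pw 1)) = true := by
  unfold scoreRow; split_ifs with h1 h2 <;> simp_all

theorem one_le_score (id_pw row : List String) :
    1 ≤ scoreRow id_pw row ↔
      (PySem.List.pyGet? row 0 == PySem.List.pyGet? id_pw 0) = true := by
  unfold scoreRow; split_ifs with h1 h2 <;> simp_all

theorem solution_spec : Claim_equal_solution := by
  intro id_pw db _ _
  unfold Spec_solution solution solution_alt
  set best := (db.map (scoreRow id_pw)).foldl max 0 with hbest
  have hle2 : best ≤ 2 := by
    apply foldl_max_le _ _ _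
    · omega
    · intro x hx
      obtain ⟨row, _, rfl⟩ := List.mem_map.mp hx
      exact scoreRow_le_two id_pw row
  have h2 : 2 ≤ best ↔ ∃ row ∈ db,
      ((PySem.List.pyGet? row 0 == PySem.List.pyGet? id_pw 0) &&
       (PySem.List.pyGet? row 1 == PySem.List.pyGet? id_pw 1)) = true := by
    rw [hbest, le_foldl_max]
    constructor
    · rintro (h | ⟨x, hx, hx2⟩)
      · omega
      · obtain ⟨row, hr, rfl⟩ := List.mem_map.mp hx
        exact ⟨row, hr, (two_le_score id_pw row).mp hx2⟩
    · rintro ⟨row, hr, hm⟩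
      exact Or.inr ⟨_, List.mem_map.mpr ⟨row, hr, rfl⟩, (two_le_score id_pw row).mpr hm⟩
  have h1 : 1 ≤ best ↔ ∃ row ∈ db,
      (PySem.List.pyGet? row 0 == PySem.List.pyGet? id_pw 0) = true := by
    rw [hbest, le_foldl_max]
    constructor
    · rintro (h | ⟨x, hx, hx2⟩)
      · omega
      · obtain ⟨row, hr, rfl⟩ := List.mem_map.mp hx
        exact ⟨row, hr, (one_le_score id_pw row).mp hx2⟩
    · rintro ⟨row, hr, hm⟩
      exact Or.inr ⟨_, List.mem_map.mpr ⟨row, hr, rfl⟩, (one_le_score id_pw row).mpr hm⟩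
  have hc11 : (db.map (fun row =>
      (PySem.List.pyGet? row 0 == PySem.List.pyGet? id_pw 0,
       PySem.List.pyGet? row 1 == PySem.List.pyGet? id_pw 1))).contains (true, true) = true ↔
      ∃ row ∈ db,
        ((PySem.List.pyGet? row 0 == PySem.List.pyGet? id_pw 0) &&
         (PySem.List.pyGet? row 1 == PySem.List.pyGet? id_pw 1)) = true := by
    simp only [List.contains_iff_mem, List.mem_map]
    constructor
    · rintro ⟨row, hr, hp⟩
      exact ⟨row, hr, by simpa [Prod.ext_iff] using hp.symm⟩
    · rintro ⟨row, hr, hp⟩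
      simp only [Bool.and_eq_true] at hp
      exact ⟨row, hr, by simp [hp.1, hp.2]⟩
  have hc10 : (db.map (fun row =>
      (PySem.List.pyGet? row 0 == PySem.List.pyGet? id_pw 0,
       PySem.List.pyGet? row 1 == PySem.List.pyGet? id_pw 1))).contains (true, false) = true ↔
      ∃ row ∈ db,
        (PySem.List.pyGet? row 0 == PySem.List.pyGet? id_pw 0) = true ∧
        ¬ (PySem.List.pyGet? row 1 == PySem.List.pyGet? id_pw 1) = true := by
    simp only [List.contains_iff_mem, List.mem_map]
    constructor
    · rintro ⟨row, hr, hp⟩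
      simp only [Prod.mk.injEq] at hp
      exact ⟨row, hr, hp.1, by simp [hp.2]⟩
    · rintro ⟨row, hr, h1, h2⟩
      simp only [Bool.not_eq_true] at h2
      exact ⟨row, hr, by simp [h1, h2]⟩
  by_cases hfull : ∃ row ∈ db,
      ((PySem.List.pyGet? row 0 == PySem.List.pyGet? id_pw 0) &&
       (PySem.List.pyGet? row 1 == PySem.List.pyGet? id_pw 1)) = true
  · have : best = 2 := le_antisymm hle2 (h2.mpr hfull)
    rw [if_pos (hc11.mpr hfull), this]
    rfl
  · have hb2 : best ≠ 2 := fun h => hfull (h2.mp (by omega))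
    rw [if_neg (fun h => hfull (hc11.mp h))]
    by_cases hid : ∃ row ∈ db,
        (PySem.List.pyGet? row 0 == PySem.List.pyGet? id_pw 0) = true
    · have hbest1 : best = 1 := by
        have := h1.mpr hid
        omega
      have hpart : ∃ row ∈ db,
          (PySem.List.pyGet? row 0 == PySem.List.pyGet? id_pw 0) = true ∧
          ¬ (PySem.List.pyGet? row 1 == PySem.List.pyGet? id_pw 1) = true := by
        obtain ⟨row, hr, hm⟩ := hid
        refine ⟨row, hr, hm, fun hpw => hfull ⟨row, hr, by simp [hm, hpw]⟩⟩
      rw [if_neg (by simpa using hc10.mpr hpart), hbest1]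
      rfl
    · have hbest0 : best = 0 := by
        have : ¬ 1 ≤ best := fun h => hid (h1.mp h)
        omega
      have hno : ¬ ∃ row ∈ db,
          (PySem.List.pyGet? row 0 == PySem.List.pyGet? id_pw 0) = true ∧
          ¬ (PySem.List.pyGet? row 1 == PySem.List.pyGet? id_pw 1) = true := by
        rintro ⟨row, hr, hm, _⟩
        exact hid ⟨row, hr, hm⟩
      rw [if_pos (by simpa using fun h => hno (hc10.mp h)), hbest0]
      rfl
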